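-- pv_equiv track=rewrite | github.com/broersma/advent-of-code-2020-python | 17_1.py | answer
-- ===== SOURCE A (Python) =====
-- def neighbors(cube):
--     """
--     >>> len(list(neighbors((0,0,0))))
--     26
--     """
--     x,y,z = cube
--     for dx in range(-1, 2):
--         for dy in range (-1, 2):
--             for dz in range(-1, 2):
--                 if (dx,dy,dz) != (0,0,0):
--                     yield (x+dx, y+dy, z+dz)
--
-- def get_num_active_neighbors(cube, active_cubes):
--     return len(list(neighbor for neighbor in neighbors(cube) if neighbor in active_cubes))
--
-- def answer(input):
--     """
--     >>> answer('''.#.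
--     ... ..#
--     ... ###''')
--     112
--     """
--     lines = input.split('\n')
--
--     active_cubes = set()
--     z = 0
--     for y, line in enumerate(lines):
--         for x, ch in enumerate(line):
--             if ch == '#':
--                 active_cubes.add((x,y,z))
--
--     for i in range(6):
--         cubes_to_check = set()
--         for active_cube in active_cubes:
--             cubes_to_check.add(active_cube)
--             cubes_to_check.update(neighbors(active_cube))
--
--         new_active_cubes = set()
--         for cube in cubes_to_check:
--             if cube in active_cubes:
--                 if get_num_active_neighbors(cube, active_cubes) in (2, 3):
--                     new_active_cubes.add(cube)
--             else:
--                 if get_num_active_neighbors(cube, active_cubes) == 3: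
--                     new_active_cubes.add(cube)
--         active_cubes = new_active_cubes
--     return len(active_cubes)
-- ===== SOURCE B (Python) =====
-- _OFFSETS = [(dx, dy, dz)
--             for dx in (-1, 0, 1)
--             for dy in (-1, 0, 1)
--             for dz in (-1, 0, 1)
--             if (dx, dy, dz) != (0, 0, 0)]
--
-- def answer(input):
--     active_cubes = set()
--     z = 0
--     for y, line in enumerate(input.split('\n')):
--         for x, ch in enumerate(line):
--             if ch == '#':
--                 active_cubes.add((x, y, z))
--
--     for i in range(6):
--         count = {}
--         for (cx, cy, cz) in active_cubes:
--             for dx, dy, dz in _OFFSETS: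
--                 nb = (cx + dx, cy + dy, cz + dz)
--                 count[nb] = count.get(nb, 0) + 1
--         active_cubes = {c for c, n in count.items()
--                         if n == 3 or (n == 2 and c in active_cubes)}
--     return len(active_cubes)
-- ===== Notes on version B (the rewrite author's own statement) =====
-- stated objective: alternative
-- what changed: Each generation, instead of collecting every active cube plus its 26 neighbours into a candidate set and then re-scanning all 26 neighbours of every candidate, B makes one scatter pass over the active cubes that accumulates per-cell neighbour counts in a dict and reads the new generation straight off the dict items.
import Mathlib
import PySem

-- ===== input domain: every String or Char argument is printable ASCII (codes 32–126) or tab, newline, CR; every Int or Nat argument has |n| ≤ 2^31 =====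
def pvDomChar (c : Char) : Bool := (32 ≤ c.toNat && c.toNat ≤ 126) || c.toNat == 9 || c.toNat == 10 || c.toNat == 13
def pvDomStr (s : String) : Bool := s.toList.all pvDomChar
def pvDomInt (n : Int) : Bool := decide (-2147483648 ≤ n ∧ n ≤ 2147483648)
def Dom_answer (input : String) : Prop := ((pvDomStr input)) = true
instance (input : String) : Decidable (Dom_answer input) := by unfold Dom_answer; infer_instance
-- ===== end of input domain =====

-- B replaces A's expand-candidates-then-rescan-26-neighbours step by one scatter pass that counts,
-- in a dict, how often each cell is a neighbour of an active cube (objective: alternative algorithm).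

-- shared input parsing (both Pythons parse the grid with the identical loop)
def pvParse (input : String) : PySem.Set (Int × Int × Int) :=
  (PySem.List.enumerate (PySem.Chars.splitOn input.toList ['\n'])).foldl (fun ac yl =>
    (PySem.List.enumerate yl.2).foldl (fun ac xc =>
      if xc.2 = '#' then PySem.Set.add ac (xc.1, yl.1, (0 : Int)) else ac) ac) PySem.Set.empty

-- ===== PORT A =====
-- the 'neighbors' generator: triple range(-1, 2) loop skipping (0,0,0)
def pvNeighborsA (c : Int × Int × Int) : List (Int × Int × Int) :=
  (PySem.List.pyRange (-1) 2 1).flatMap (fun dx =>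
    (PySem.List.pyRange (-1) 2 1).flatMap (fun dy =>
      (PySem.List.pyRange (-1) 2 1).filterMap (fun dz =>
        if (dx, dy, dz) ≠ ((0 : Int), (0 : Int), (0 : Int)) then
          some (c.1 + dx, c.2.1 + dy, c.2.2 + dz)
        else none)))

-- get_num_active_neighbors
def pvNumActiveNeighbors (cube : Int × Int × Int) (active : PySem.Set (Int × Int × Int)) : Int :=
  (((pvNeighborsA cube).filter (fun nb => PySem.Set.contains active nb)).length : Int)

-- one generation, A's way: collect every active cube and all its neighbours, then rescan each candidate
def pvStepA (active : PySem.Set (Int × Int × Int)) : PySem.Set (Int × Int × Int) :=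
  let check := active.foldl
    (fun s c => PySem.Set.update (PySem.Set.add s c) (pvNeighborsA c)) PySem.Set.empty
  check.foldl (fun s cube =>
    if PySem.Set.contains active cube then
      if pvNumActiveNeighbors cube active = 2 ∨ pvNumActiveNeighbors cube active = 3 then
        PySem.Set.add s cube
      else s
    else
      if pvNumActiveNeighbors cube active = 3 then PySem.Set.add s cube else s) PySem.Set.empty

def answer (input : String) : Int :=
  ((PySem.List.pyRange 0 6 1).foldl (fun ac _ => pvStepA ac) (pvParse input)).length

-- ===== PORT B =====
-- _OFFSETS: the 26 non-zero displacement triples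
def pvOffsets : List (Int × Int × Int) :=
  ([-1, 0, 1] : List Int).flatMap (fun dx =>
    ([-1, 0, 1] : List Int).flatMap (fun dy =>
      ([-1, 0, 1] : List Int).filterMap (fun dz =>
        if (dx, dy, dz) ≠ ((0 : Int), (0 : Int), (0 : Int)) then some (dx, dy, dz) else none)))

-- one generation, B's way: scatter +1 onto each neighbour of each active cube, then read the dict off
def pvStepB (active : PySem.Set (Int × Int × Int)) : PySem.Set (Int × Int × Int) :=
  let count : PySem.Dict (Int × Int × Int) Int :=
    active.foldl (fun d c =>
      pvOffsets.foldl (fun d o =>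
        let nb := (c.1 + o.1, c.2.1 + o.2.1, c.2.2 + o.2.2)
        d.insert nb (d.getD nb 0 + 1)) d) PySem.Dict.empty
  count.items.foldl (fun s p =>
    if p.2 = 3 ∨ (p.2 = 2 ∧ PySem.Set.contains active p.1) then PySem.Set.add s p.1 else s)
    PySem.Set.empty

def answer_alt (input : String) : Int :=
  ((PySem.List.pyRange 0 6 1).foldl (fun ac _ => pvStepB ac) (pvParse input)).length

-- ===== PRECONDITION & SPEC =====
def Spec_answer (input : String) (out : Int) : Prop := out = answer_alt input
instance (input : String) (out : Int) : Decidable (Spec_answer input out) := by unfold Spec_answer; infer_instance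

-- ===== CLAIM (what is proved, stated in full; the proofs are below) =====
def Claim_equal_answer : Prop := ∀ (input : String), Dom_answer input → Spec_answer input (answer input)

-- ===== LEMMAS AND PROOFS =====

-- A's neighbour list is exactly the 26 offsets added to the cube
theorem pvNeighborsA_eq (c : Int × Int × Int) :
    pvNeighborsA c = pvOffsets.map (fun o => (c.1 + o.1, c.2.1 + o.2.1, c.2.2 + o.2.2)) := rfl

theorem pvOffsets_nodup : pvOffsets.Nodup := by decide

theorem pvOffsets_neg_mem : ∀ o ∈ pvOffsets, ((-o.1, -o.2.1, -o.2.2) : Int × Int × Int) ∈ pvOffsets := by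
  decide

theorem pvNeighborsA_nodup (c : Int × Int × Int) : (pvNeighborsA c).Nodup := by
  rw [pvNeighborsA_eq]
  refine List.Nodup.map ?_ pvOffsets_nodup
  intro a b h
  obtain ⟨a1, a2, a3⟩ := a; obtain ⟨b1, b2, b3⟩ := b
  simp only [Prod.mk.injEq] at h ⊢
  omega

theorem mem_pvNeighborsA {x c : Int × Int × Int} :
    x ∈ pvNeighborsA c ↔ ∃ o ∈ pvOffsets, x = (c.1 + o.1, c.2.1 + o.2.1, c.2.2 + o.2.2) := by
  rw [pvNeighborsA_eq, List.mem_map]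
  constructor
  · rintro ⟨o, ho, rfl⟩; exact ⟨o, ho, rfl⟩
  · rintro ⟨o, ho, rfl⟩; exact ⟨o, ho, rfl⟩

theorem pvNeighborsA_symm_mp {x c : Int × Int × Int} (h : x ∈ pvNeighborsA c) :
    c ∈ pvNeighborsA x := by
  rw [mem_pvNeighborsA] at h
  obtain ⟨o, ho, rfl⟩ := h
  rw [mem_pvNeighborsA]
  refine ⟨(-o.1, -o.2.1, -o.2.2), pvOffsets_neg_mem o ho, ?_⟩
  obtain ⟨c1, c2, c3⟩ := c
  simp only [Prod.mk.injEq]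
  refine ⟨by ring, by ring, by ring⟩

theorem pvNeighborsA_symm {x c : Int × Int × Int} : x ∈ pvNeighborsA c ↔ c ∈ pvNeighborsA x :=
  ⟨pvNeighborsA_symm_mp, pvNeighborsA_symm_mp⟩

-- contains is membership
theorem pv_contains_eq (s : List (Int × Int × Int)) (x : Int × Int × Int) :
    PySem.Set.contains s x = decide (x ∈ s) := by
  by_cases h : x ∈ s
  · simp only [h, decide_true]
    exact (PySem.Set.contains_iff s x).mpr h
  · simp only [h, decide_false]
    cases hc : PySem.Set.contains s x
    · rfl
    · exact absurd ((PySem.Set.contains_iff s x).mp hc) h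

-- the mathematical neighbour count (Nat-valued)
def pvNA (s : List (Int × Int × Int)) (x : Int × Int × Int) : Nat :=
  ((pvNeighborsA x).filter (fun nb => decide (nb ∈ s))).length

-- the survival rule: what one generation keeps, stated on membership only
def pvRule (s : List (Int × Int × Int)) (x : Int × Int × Int) : Prop :=
  (x ∈ s ∧ (pvNA s x = 2 ∨ pvNA s x = 3)) ∨ (x ∉ s ∧ pvNA s x = 3)

theorem pvNA_pos_mem {s : List (Int × Int × Int)} {x : Int × Int × Int} (h : 0 < pvNA s x) :
    ∃ c ∈ s, x ∈ pvNeighborsA c := by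
  obtain ⟨nb, hnb⟩ := List.exists_mem_of_length_pos h
  rw [List.mem_filter, decide_eq_true_eq] at hnb
  exact ⟨nb, hnb.2, pvNeighborsA_symm_mp hnb.1⟩

-- generic add-if fold: membership and nodup
theorem pv_foldl_addIf_mem {β : Type} (l : List β) (key : β → Int × Int × Int)
    (q : β → Prop) [DecidablePred q] (e : List (Int × Int × Int)) (y : Int × Int × Int) :
    y ∈ l.foldl (fun s p => if q p then PySem.Set.add s (key p) else s) e ↔
      y ∈ e ∨ ∃ p ∈ l, q p ∧ key p = y := by
  induction l generalizing e with
  | nil => simp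
  | cons a t ih =>
    rw [List.foldl_cons]
    by_cases hq : q a
    · rw [if_pos hq, ih]
      constructor
      · rintro (h | ⟨p, hp, h1, h2⟩)
        · rcases (PySem.Set.mem_add e (key a) y).mp h with h | h
          · exact Or.inl h
          · exact Or.inr ⟨a, by simp, hq, h.symm⟩
        · exact Or.inr ⟨p, List.mem_cons_of_mem a hp, h1, h2⟩
      · rintro (h | ⟨p, hp, h1, h2⟩)
        · exact Or.inl ((PySem.Set.mem_add e (key a) y).mpr (Or.inl h))
        · rcases List.mem_cons.mp hp with rfl | hp
          · exact Or.inl ((PySem.Set.mem_add e (key p) y).mpr (Or.inr h2.symm))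
          · exact Or.inr ⟨p, hp, h1, h2⟩
    · rw [if_neg hq, ih]
      constructor
      · rintro (h | ⟨p, hp, h1, h2⟩)
        · exact Or.inl h
        · exact Or.inr ⟨p, List.mem_cons_of_mem a hp, h1, h2⟩
      · rintro (h | ⟨p, hp, h1, h2⟩)
        · exact Or.inl h
        · rcases List.mem_cons.mp hp with rfl | hp
          · exact absurd h1 hq
          · exact Or.inr ⟨p, hp, h1, h2⟩

theorem pv_foldl_addIf_nodup {β : Type} (l : List β) (key : β → Int × Int × Int)
    (q : β → Prop) [DecidablePred q] (e : List (Int × Int × Int)) (he : e.Nodup) :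
    (l.foldl (fun s p => if q p then PySem.Set.add s (key p) else s) e).Nodup := by
  induction l generalizing e with
  | nil => exact he
  | cons a t ih =>
    rw [List.foldl_cons]
    by_cases hq : q a
    · simp only [hq, if_pos]
      exact ih _ (PySem.Set.nodup_add e (key a) he)
    · simp only [hq, if_neg, not_false_iff]
      exact ih _ he

-- A's candidate set
theorem pv_check_mem (l e : List (Int × Int × Int)) (y : Int × Int × Int) :
    y ∈ l.foldl (fun s c => PySem.Set.update (PySem.Set.add s c) (pvNeighborsA c)) e ↔
      y ∈ e ∨ ∃ c ∈ l, y = c ∨ y ∈ pvNeighborsA c := by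
  induction l generalizing e with
  | nil => simp
  | cons a t ih =>
    rw [List.foldl_cons, ih]
    constructor
    · rintro (h | ⟨c, hc, h⟩)
      · rcases (PySem.Set.mem_update _ _ y).mp h with h | h
        · rcases (PySem.Set.mem_add e a y).mp h with h | h
          · exact Or.inl h
          · exact Or.inr ⟨a, by simp, Or.inl h⟩
        · exact Or.inr ⟨a, by simp, Or.inr h⟩
      · exact Or.inr ⟨c, List.mem_cons_of_mem a hc, h⟩
    · rintro (h | ⟨c, hc, h⟩)
      · exact Or.inl ((PySem.Set.mem_update _ _ y).mpr
          (Or.inl ((PySem.Set.mem_add e a y).mpr (Or.inl h))))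
      · rcases List.mem_cons.mp hc with rfl | hc
        · rcases h with rfl | h
          · exact Or.inl ((PySem.Set.mem_update _ _ y).mpr
              (Or.inl ((PySem.Set.mem_add _ _ y).mpr (Or.inr rfl))))
          · exact Or.inl ((PySem.Set.mem_update _ _ y).mpr (Or.inr h))
        · exact Or.inr ⟨c, hc, h⟩

-- A's step body is an add-if fold over the candidate list
theorem pvStepA_body (s : PySem.Set (Int × Int × Int)) :
    (fun (st : PySem.Set (Int × Int × Int)) cube =>
      if PySem.Set.contains s cube then
        if pvNumActiveNeighbors cube s = 2 ∨ pvNumActiveNeighbors cube s = 3 then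
          PySem.Set.add st cube
        else st
      else
        if pvNumActiveNeighbors cube s = 3 then PySem.Set.add st cube else st) =
    (fun st cube =>
      if (if cube ∈ s then pvNA s cube = 2 ∨ pvNA s cube = 3 else pvNA s cube = 3) then
        PySem.Set.add st cube
      else st) := by
  funext st cube
  have hnum : pvNumActiveNeighbors cube s = (pvNA s cube : Int) := by
    unfold pvNumActiveNeighbors pvNA
    congr 2
    exact List.filter_congr fun nb _ => pv_contains_eq s nb
  by_cases h : cube ∈ s
  · simp only [pv_contains_eq, h, decide_true, if_true, hnum]
    refine if_congr ?_ rfl rfl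
    constructor <;> intro hh <;> omega
  · simp only [pv_contains_eq, h, decide_false, Bool.false_eq_true, if_false, hnum]
    refine if_congr ?_ rfl rfl
    constructor <;> intro hh <;> omega

theorem pvStepA_mem {s : List (Int × Int × Int)} (x : Int × Int × Int) :
    x ∈ pvStepA s ↔ pvRule s x := by
  simp only [pvStepA]
  rw [pvStepA_body s]
  rw [pv_foldl_addIf_mem (β := Int × Int × Int) _ (fun c => c)
    (fun cube => if cube ∈ s then pvNA s cube = 2 ∨ pvNA s cube = 3 else pvNA s cube = 3)]
  simp only [PySem.Set.empty, List.not_mem_nil, false_or]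
  constructor
  · rintro ⟨p, hp, hq, rfl⟩
    by_cases h : p ∈ s
    · rw [if_pos h] at hq; exact Or.inl ⟨h, hq⟩
    · rw [if_neg h] at hq; exact Or.inr ⟨h, hq⟩
  · intro hr
    have hcheck : x ∈ List.foldl
        (fun s c => PySem.Set.update (PySem.Set.add s c) (pvNeighborsA c)) PySem.Set.empty s := by
      rw [pv_check_mem]
      rcases hr with ⟨h, _⟩ | ⟨h, h3⟩
      · exact Or.inr ⟨x, h, Or.inl rfl⟩
      · obtain ⟨c, hc, hx⟩ := pvNA_pos_mem (by omega : 0 < pvNA s x)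
        exact Or.inr ⟨c, hc, Or.inr hx⟩
    refine ⟨x, hcheck, ?_, rfl⟩
    rcases hr with ⟨h, hq⟩ | ⟨h, hq⟩
    · rw [if_pos h]; exact hq
    · rw [if_neg h]; exact hq

theorem pvStepA_nodup (s : List (Int × Int × Int)) : (pvStepA s).Nodup := by
  simp only [pvStepA]
  rw [pvStepA_body s]
  exact pv_foldl_addIf_nodup (β := Int × Int × Int) _ (fun c => c) _ _ List.nodup_nil

-- B's neighbour-count dict is Counter(flat list of all neighbours of active cubes)
theorem pvStepB_count (s : List (Int × Int × Int)) :
    s.foldl (fun d c =>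
        pvOffsets.foldl (fun d o =>
          d.insert (c.1 + o.1, c.2.1 + o.2.1, c.2.2 + o.2.2)
            (d.getD (c.1 + o.1, c.2.1 + o.2.1, c.2.2 + o.2.2) 0 + 1)) d)
      PySem.Dict.empty =
    PySem.Dict.counter (s.flatMap pvNeighborsA) := by
  have h1 : (fun (d : PySem.Dict (Int × Int × Int) Int) (c : Int × Int × Int) =>
        pvOffsets.foldl (fun d o =>
          d.insert (c.1 + o.1, c.2.1 + o.2.1, c.2.2 + o.2.2)
            (d.getD (c.1 + o.1, c.2.1 + o.2.1, c.2.2 + o.2.2) 0 + 1)) d)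
      = (fun d c => (pvNeighborsA c).foldl (fun d x => d.insert x (d.getD x 0 + 1)) d) := by
    funext d c
    rw [pvNeighborsA_eq, List.foldl_map]
  rw [h1, ← List.foldl_flatMap, PySem.Dict.foldl_insert_getD_add_one_eq_counter]

-- B's flat neighbour list counts exactly A's active-neighbour count
theorem pvStepB_count_eq {s : List (Int × Int × Int)} (hs : s.Nodup) (x : Int × Int × Int) :
    (s.flatMap pvNeighborsA).count x = pvNA s x := by
  have h1 : ∀ t : List (Int × Int × Int), (t.flatMap pvNeighborsA).count x
      = t.countP (fun c => decide (x ∈ pvNeighborsA c)) := by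
    intro t
    induction t with
    | nil => simp
    | cons a t ih =>
      rw [List.flatMap_cons, List.count_append, List.countP_cons, ih,
        List.Nodup.count (pvNeighborsA_nodup a)]
      by_cases h : x ∈ pvNeighborsA a
      · simp [h]
        omega
      · simp [h]
  have h2 : s.countP (fun c => decide (x ∈ pvNeighborsA c))
      = s.countP (fun c => decide (c ∈ pvNeighborsA x)) :=
    List.countP_congr fun c _ => by
      simp only [decide_eq_true_eq]; exact pvNeighborsA_symm
  have h3 : s.countP (fun c => decide (c ∈ pvNeighborsA x))
      = (s.filter (fun c => decide (c ∈ pvNeighborsA x))).length :=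
    List.countP_eq_length_filter
  rw [h1 s, h2, h3]
  unfold pvNA
  rw [← List.toFinset_card_of_nodup (hs.filter _),
      ← List.toFinset_card_of_nodup ((pvNeighborsA_nodup x).filter _)]
  congr 1
  ext a
  simp only [List.mem_toFinset, List.mem_filter, decide_eq_true_eq]
  tauto

theorem pvStepB_mem {s : List (Int × Int × Int)} (hs : s.Nodup) (x : Int × Int × Int) :
    x ∈ pvStepB s ↔ pvRule s x := by
  simp only [pvStepB]
  rw [pvStepB_count s, pv_foldl_addIf_mem (β := (Int × Int × Int) × Int) _ (fun p => p.1)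
    (fun p => p.2 = 3 ∨ (p.2 = 2 ∧ PySem.Set.contains s p.1 = true))]
  simp only [PySem.Set.empty, List.not_mem_nil, false_or]
  rw [PySem.Dict.items_counter]
  constructor
  · rintro ⟨p, hp, hq, rfl⟩
    rw [List.mem_map] at hp
    obtain ⟨k, hk, rfl⟩ := hp
    rw [PySem.Set.mem_ofList] at hk
    rw [pvStepB_count_eq hs] at hq
    simp only [pv_contains_eq, decide_eq_true_eq] at hq
    by_cases h : k ∈ s
    · rcases hq with h3 | ⟨h2, _⟩
      · exact Or.inl ⟨h, Or.inr (by exact_mod_cast h3)⟩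
      · exact Or.inl ⟨h, Or.inl (by exact_mod_cast h2)⟩
    · rcases hq with h3 | ⟨_, hmem⟩
      · exact Or.inr ⟨h, by exact_mod_cast h3⟩
      · exact absurd hmem h
  · intro hr
    have hflat : x ∈ s.flatMap pvNeighborsA := by
      rw [List.mem_flatMap]
      refine pvNA_pos_mem ?_
      rcases hr with ⟨_, h⟩ | ⟨_, h⟩ <;> omega
    refine ⟨(x, ((s.flatMap pvNeighborsA).count x : Int)), ?_, ?_, rfl⟩
    · rw [List.mem_map]
      exact ⟨x, (PySem.Set.mem_ofList _ x).mpr hflat, rfl⟩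
    · simp only [pvStepB_count_eq hs, pv_contains_eq, decide_eq_true_eq]
      rcases hr with ⟨h, h2 | h3⟩ | ⟨h, h3⟩
      · exact Or.inr ⟨by exact_mod_cast h2, h⟩
      · exact Or.inl (by exact_mod_cast h3)
      · exact Or.inl (by exact_mod_cast h3)

theorem pvStepB_nodup (s : List (Int × Int × Int)) : (pvStepB s).Nodup := by
  simp only [pvStepB]
  exact pv_foldl_addIf_nodup (β := (Int × Int × Int) × Int) _ (fun p => p.1) _ _ List.nodup_nil

-- the rule only looks at membership
theorem pvRule_congr {s t : List (Int × Int × Int)} (h : ∀ y, y ∈ s ↔ y ∈ t)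
    (x : Int × Int × Int) : pvRule s x ↔ pvRule t x := by
  have hNA : pvNA s x = pvNA t x := by
    unfold pvNA
    congr 1
    exact List.filter_congr fun nb _ => by simp only [decide_eq_decide]; exact h nb
  unfold pvRule
  rw [hNA]
  constructor
  · rintro (⟨h1, h2⟩ | ⟨h1, h2⟩)
    · exact Or.inl ⟨(h x).mp h1, h2⟩
    · exact Or.inr ⟨fun hx => h1 ((h x).mpr hx), h2⟩
  · rintro (⟨h1, h2⟩ | ⟨h1, h2⟩)
    · exact Or.inl ⟨(h x).mpr h1, h2⟩
    · exact Or.inr ⟨fun hx => h1 ((h x).mp hx), h2⟩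

theorem pvParse_nodup (input : String) : (pvParse input).Nodup := by
  unfold pvParse
  generalize PySem.List.enumerate (PySem.Chars.splitOn input.toList ['\n']) = l
  have : ∀ (l : List (Int × List Char)) (e : List (Int × Int × Int)), e.Nodup →
      (l.foldl (fun ac yl =>
        (PySem.List.enumerate yl.2).foldl (fun ac xc =>
          if xc.2 = '#' then PySem.Set.add ac (xc.1, yl.1, (0 : Int)) else ac) ac) e).Nodup := by
    intro l
    induction l with
    | nil => intro e he; exact he
    | cons a t ih =>
      intro e he
      exact ih _ (pv_foldl_addIf_nodup (PySem.List.enumerate a.2)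
        (fun xc => (xc.1, a.1, (0 : Int))) (fun xc => xc.2 = '#') e he)
  exact this l PySem.Set.empty List.nodup_nil

theorem pv_len_eq {s t : List (Int × Int × Int)} (hs : s.Nodup) (ht : t.Nodup)
    (h : ∀ y, y ∈ s ↔ y ∈ t) : s.length = t.length :=
  ((List.perm_ext_iff_of_nodup hs ht).mpr h).length_eq

-- ===== VERDICT (by name: the statement is the Claim_ definition above) =====
theorem answer_spec : Claim_equal_answer := by
  intro input _
  unfold Spec_answer answer answer_alt
  have h6 : PySem.List.pyRange 0 6 1 = [0, 1, 2, 3, 4, 5] := by decide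
  rw [h6]
  simp only [List.foldl]
  set s0 := pvParse input with hs0
  have step : ∀ s t : List (Int × Int × Int), s.Nodup → t.Nodup → (∀ y, y ∈ s ↔ y ∈ t) →
      (pvStepA s).Nodup ∧ (pvStepB t).Nodup ∧ (∀ y, y ∈ pvStepA s ↔ y ∈ pvStepB t) := by
    intro s t hs ht h
    refine ⟨pvStepA_nodup s, pvStepB_nodup t, fun y => ?_⟩
    rw [pvStepA_mem y, pvStepB_mem ht y]
    exact pvRule_congr (fun z => (h z)) y
  have h0 : s0.Nodup := pvParse_nodup input
  have c1 := step s0 s0 h0 h0 (fun _ => Iff.rfl)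
  have c2 := step _ _ c1.1 c1.2.1 c1.2.2
  have c3 := step _ _ c2.1 c2.2.1 c2.2.2
  have c4 := step _ _ c3.1 c3.2.1 c3.2.2
  have c5 := step _ _ c4.1 c4.2.1 c4.2.2
  have c6 := step _ _ c5.1 c5.2.1 c5.2.2
  exact_mod_cast pv_len_eq c6.1 c6.2.1 c6.2.2
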